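-- pv_equiv track=rewrite | github.com/JP-Estudante/Compiladores | sintaxe_replacer/main.py | brackets_remove
-- ===== SOURCE A (Python) =====
-- def brackets_remove(code_lines):
--     pilha = []
--     processed_lines = []
--
--     for line in code_lines:
--
--         while '{' in line:
--             push(pilha, '{')
--             line = line.replace('{', '', 1)  # Remove o primeiro '{' encontrado
--
--         while '}' in line:
--             pop(pilha)
--             line = line.replace('}', '', 1)  # Remove o primeiro '}' encontrado
--
--         processed_lines.append(line)  # Adiciona a linha processada
--
--     if (is_empty(pilha)): # Verifica se a pilha esta vazia
--         return processed_lines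
--     else:
--         raise IndexError("pilha não vazia, chave aberta que não foi fechada")
--
-- def push(pilha, item):
--     pilha.append(item)
--
-- def pop(pilha):
--     if not pilha:
--         raise IndexError("pop em uma pilha vazia")
--     else:
--         pilha.pop()
--
-- def is_empty(pilha):
--     return len(pilha) == 0
-- ===== SOURCE B (Python) =====
-- def brackets_remove(code_lines):
--     depth = 0
--     processed = []
--     for line in code_lines:
--         opens = line.count('{')
--         closes = line.count('}')
--         if depth + opens < closes:
--             raise IndexError("pop em uma pilha vazia")
--         depth += opens - closes
--         processed.append(line.replace('{', '').replace('}', ''))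
--     if depth != 0:
--         raise IndexError("pilha não vazia, chave aberta que não foi fechada")
--     return processed
-- ===== Notes on version B (the rewrite author's own statement) =====
-- stated objective: simpler
-- what changed: Replaces the per-brace while-loops (an 'in' scan and a replace(...,1) rebuild per brace) and the materialised stack of '{' markers with per-line count()/replace() calls and a single integer depth counter.
import Mathlib
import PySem

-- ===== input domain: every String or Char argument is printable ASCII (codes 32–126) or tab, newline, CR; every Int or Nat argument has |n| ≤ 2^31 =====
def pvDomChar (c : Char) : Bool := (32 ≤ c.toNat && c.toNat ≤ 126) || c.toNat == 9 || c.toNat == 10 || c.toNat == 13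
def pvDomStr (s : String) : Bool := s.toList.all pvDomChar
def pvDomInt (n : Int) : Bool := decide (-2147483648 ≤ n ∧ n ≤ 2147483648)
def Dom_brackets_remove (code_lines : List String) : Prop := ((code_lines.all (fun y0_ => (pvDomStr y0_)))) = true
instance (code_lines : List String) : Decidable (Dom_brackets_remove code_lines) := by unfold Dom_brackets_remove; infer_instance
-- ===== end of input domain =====

-- B replaces A's per-brace while-loops (an 'in' scan and a replace(...,1) rebuild per brace, plus a
-- materialised stack of '{' markers) with per-line count()/replace() and one integer depth counter.
-- Equivalence is about the RETURN value; both raise on unbalanced input (excluded by Pre_).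

-- ===== PORT A =====
-- line.replace(c, '', 1): remove the first occurrence of c
def removeFirst (c : Char) : List Char → List Char
  | [] => []
  | x :: xs => if x = c then xs else x :: removeFirst c xs

theorem removeFirst_length_lt (c : Char) (l : List Char) (h : c ∈ l) :
    (removeFirst c l).length < l.length := by
  induction l with
  | nil => cases h
  | cons x xs ih =>
    by_cases hx : x = c
    · simp [removeFirst, hx]
    · have : c ∈ xs := by cases h with
        | head => exact absurd rfl hx
        | tail _ h => exact h
      simp [removeFirst, hx]
      exact ih this

-- while '{' in line: push(pilha,'{'); line = line.replace('{','',1)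
def loopOpen (pilha line : List Char) : List Char × List Char :=
  if h : '{' ∈ line then loopOpen (pilha ++ ['{']) (removeFirst '{' line)
  else (pilha, line)
termination_by line.length
decreasing_by exact removeFirst_length_lt '{' line h

-- while '}' in line: pop(pilha); line = line.replace('}','',1)  (pop raises on empty → none)
def loopClose (pilha line : List Char) : Option (List Char × List Char) :=
  if h : '}' ∈ line then
    if pilha.isEmpty then none
    else loopClose pilha.dropLast (removeFirst '}' line)
  else some (pilha, line)
termination_by line.length
decreasing_by exact removeFirst_length_lt '}' line h

-- the main for-loop; none = an IndexError path of A
def goA (pilha : List Char) (processed : List String) : List String → Option (List String)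
  | [] => if pilha.isEmpty then some processed else none
  | l :: ls =>
    let s1 := loopOpen pilha l.toList
    match loopClose s1.1 s1.2 with
    | none => none
    | some s2 => goA s2.1 (processed ++ [String.mk s2.2]) ls

def brackets_remove (code_lines : List String) : List String :=
  (goA [] [] code_lines).getD []

-- ===== PORT B =====
-- per line: opens = line.count('{'), closes = line.count('}'),
-- line.replace('{','').replace('}','') = two filters; depth is one Int counter
def goB (depth : Int) (processed : List String) : List String → Option (List String)
  | [] => if depth = 0 then some processed else none
  | l :: ls =>
    let o := l.toList.count '{'
    let c := l.toList.count '}'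
    if depth + (o : Int) < (c : Int) then none
    else goB (depth + (o : Int) - (c : Int))
      (processed ++ [String.mk ((l.toList.filter (fun x => x ≠ '{')).filter (fun x => x ≠ '}'))]) ls

def brackets_remove_alt (code_lines : List String) : List String :=
  (goB 0 [] code_lines).getD []

-- ===== PRECONDITION & SPEC =====
-- Pre_ excludes exactly the inputs on which Python A raises IndexError: a prefix closing more
-- braces than were opened, or an unbalanced total.  B raises there too.
def Pre_brackets_remove (code_lines : List String) : Prop :=
  (∀ i, i ≤ code_lines.length →
      ((code_lines.take i).map (fun s => s.toList.count '}')).sum ≤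
      ((code_lines.take i).map (fun s => s.toList.count '{')).sum) ∧
  (code_lines.map (fun s => s.toList.count '{')).sum =
  (code_lines.map (fun s => s.toList.count '}')).sum

instance (code_lines : List String) : Decidable (Pre_brackets_remove code_lines) := by
  unfold Pre_brackets_remove; infer_instance

def pvWitness_brackets_remove : List String := ["int main() {", "  {x = 1;}", "}"]

def Spec_brackets_remove (code_lines : List String) (out : List String) : Prop := out = brackets_remove_alt code_lines
instance (code_lines : List String) (out : List String) : Decidable (Spec_brackets_remove code_lines out) := by unfold Spec_brackets_remove; infer_instance

-- ===== CLAIM (what is proved, stated in full; the proofs are below) =====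
def Claim_equal_brackets_remove : Prop := ∀ (code_lines : List String), Dom_brackets_remove code_lines → Pre_brackets_remove code_lines → Spec_brackets_remove code_lines (brackets_remove code_lines)

-- ===== LEMMAS AND PROOFS =====

theorem count_removeFirst_self (c : Char) (l : List Char) (h : c ∈ l) :
    (removeFirst c l).count c + 1 = l.count c := by
  induction l with
  | nil => cases h
  | cons x xs ih =>
    by_cases hx : x = c
    · simp [removeFirst, hx, List.count_cons]
    · have : c ∈ xs := by cases h with
        | head => exact absurd rfl hx
        | tail _ h => exact h
      simp [removeFirst, hx, List.count_cons, Ne.symm hx, ih this]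

theorem filter_removeFirst (c : Char) (l : List Char) :
    (removeFirst c l).filter (fun x => x ≠ c) = l.filter (fun x => x ≠ c) := by
  induction l with
  | nil => rfl
  | cons x xs ih =>
    by_cases hx : x = c
    · simp [removeFirst, hx]
    · simp [removeFirst, hx]
      simpa using ih

theorem loopOpen_spec (n : Nat) (line : List Char) (hn : line.length ≤ n) (pilha : List Char) :
    loopOpen pilha line =
      (pilha ++ List.replicate (line.count '{') '{', line.filter (fun x => x ≠ '{')) := by
  induction n generalizing line pilha with
  | zero =>
    have : line = [] := List.eq_nil_of_length_eq_zero (Nat.le_zero.mp hn)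
    subst this
    rw [loopOpen]; simp
  | succ n ih =>
    rw [loopOpen]
    by_cases h : '{' ∈ line
    · simp only [h, dif_pos]
      have hlen : (removeFirst '{' line).length ≤ n := by
        have := removeFirst_length_lt '{' line h; omega
      rw [ih _ hlen]
      have hc := count_removeFirst_self '{' line h
      have hf := filter_removeFirst '{' line
      rw [hf]
      have : pilha ++ ['{'] ++ List.replicate ((removeFirst '{' line).count '{') '{' =
          pilha ++ List.replicate (line.count '{') '{' := by
        rw [← hc, List.append_assoc]
        simp [List.replicate_succ]
      rw [this]
    · simp only [h, dif_neg, not_false_iff]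
      have hc : line.count '{' = 0 := by
        rw [List.count_eq_zero]; exact h
      have hf : line.filter (fun x => x ≠ '{') = line := by
        rw [List.filter_eq_self]
        intro a ha
        simp
        intro hac; exact h (hac ▸ ha)
      rw [hc, hf]; simp

theorem loopClose_spec (n : Nat) (line : List Char) (hn : line.length ≤ n) (pilha : List Char) :
    loopClose pilha line =
      if line.count '}' ≤ pilha.length then
        some (pilha.take (pilha.length - line.count '}'), line.filter (fun x => x ≠ '}'))
      else none := by
  induction n generalizing line pilha with
  | zero =>
    have : line = [] := List.eq_nil_of_length_eq_zero (Nat.le_zero.mp hn)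
    subst this
    rw [loopClose]
    simp
  | succ n ih =>
    rw [loopClose]
    by_cases h : '}' ∈ line
    · simp only [h, dif_pos]
      have hcpos : 1 ≤ line.count '}' := List.one_le_count_iff.mpr h
      by_cases hp : pilha.isEmpty
      · have : pilha.length = 0 := by
          simpa [List.isEmpty_iff_length_eq_zero] using hp
        simp [hp, this]
        omega
      · have hplen : 1 ≤ pilha.length := by
          rcases List.isEmpty_iff.not.mp hp with h'
          cases pilha with
          | nil => exact absurd rfl h'
          | cons a l => simp
        have hlen : (removeFirst '}' line).length ≤ n := by
          have := removeFirst_length_lt '}' line h; omega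
        simp only [hp, if_neg, Bool.false_eq_true, not_false_iff]
        rw [ih _ hlen]
        have hc := count_removeFirst_self '}' line h
        have hf := filter_removeFirst '}' line
        have hdl : pilha.dropLast.length = pilha.length - 1 := by
          simp [List.length_dropLast]
        by_cases hle : line.count '}' ≤ pilha.length
        · have h1 : (removeFirst '}' line).count '}' ≤ pilha.dropLast.length := by omega
          rw [if_pos h1, if_pos hle, hf]
          have e1 : pilha.dropLast.length - (removeFirst '}' line).count '}' =
              pilha.length - line.count '}' := by omega
          have e2 : pilha.dropLast.take (pilha.length - line.count '}') =
              pilha.take (pilha.length - line.count '}') := by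
            rw [List.dropLast_eq_take, List.take_take]
            have : min (pilha.length - line.count '}') (pilha.length - 1) =
                pilha.length - line.count '}' := by omega
            rw [this]
          rw [e1, e2]
        · have h1 : ¬ (removeFirst '}' line).count '}' ≤ pilha.dropLast.length := by omega
          rw [if_neg h1, if_neg hle]
    · simp only [h, dif_neg, not_false_iff]
      have hc : line.count '}' = 0 := by rw [List.count_eq_zero]; exact h
      have hf : line.filter (fun x => x ≠ '}') = line := by
        rw [List.filter_eq_self]
        intro a ha
        simp
        intro hac; exact h (hac ▸ ha)
      rw [hc, hf]; simp




theorem goA_eq_goB (ls : List String) (pilha : List Char) (processed : List String) :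
    goA pilha processed ls = goB (pilha.length : Int) processed ls := by
  induction ls generalizing pilha processed with
  | nil =>
    simp only [goA, goB]
    by_cases h : pilha.isEmpty
    · have : pilha.length = 0 := by simpa [List.isEmpty_iff_length_eq_zero] using h
      simp [h, this]
    · have hne : pilha ≠ [] := fun he => h (by simp [he])
      have hz : (pilha.length : Int) ≠ 0 := by
        have : pilha.length ≠ 0 := by simpa [List.length_eq_zero_iff] using hne
        exact_mod_cast this
      simp [h, hne, hz]
  | cons l ls ih =>
    simp only [goA, goB]
    rw [loopOpen_spec l.toList.length l.toList le_rfl pilha]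
    rw [loopClose_spec ((l.toList.filter (fun x => x ≠ '{')).length)
      (l.toList.filter (fun x => x ≠ '{')) le_rfl]
    have hcnt : (l.toList.filter (fun x => x ≠ '{')).count '}' = l.toList.count '}' := by
      induction l.toList with
      | nil => rfl
      | cons x xs ihx =>
        by_cases hx : x = '{'
        · simp [List.filter_cons, hx, List.count_cons, ihx]
        · simp [List.filter_cons, hx, List.count_cons, ihx]
    have hlen : (pilha ++ List.replicate (l.toList.count '{') '{').length =
        pilha.length + l.toList.count '{' := by simp
    by_cases hle : l.toList.count '}' ≤ pilha.length + l.toList.count '{'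
    · have h1 : (l.toList.filter (fun x => x ≠ '{')).count '}' ≤
          (pilha ++ List.replicate (l.toList.count '{') '{').length := by
        rw [hcnt, hlen]; exact hle
      rw [if_pos h1]
      have h2 : ¬ ((pilha.length : Int) + (l.toList.count '{' : Int) < (l.toList.count '}' : Int)) := by
        push_cast; omega
      simp only [h2, if_neg, not_false_iff]
      rw [ih]
      have hlen2 : (((pilha ++ List.replicate (l.toList.count '{') '{').take
          ((pilha ++ List.replicate (l.toList.count '{') '{').length -
            (l.toList.filter (fun x => x ≠ '{')).count '}')).length : Int) =
          (pilha.length : Int) + (l.toList.count '{' : Int) - (l.toList.count '}' : Int) := by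
        rw [List.length_take, hcnt, hlen]
        push_cast
        omega
      rw [hlen2]
    · have h1 : ¬ ((l.toList.filter (fun x => x ≠ '{')).count '}' ≤
          (pilha ++ List.replicate (l.toList.count '{') '{').length) := by
        rw [hcnt, hlen]; exact hle
      rw [if_neg h1]
      have h2 : (pilha.length : Int) + (l.toList.count '{' : Int) < (l.toList.count '}' : Int) := by
        push_cast; omega
      simp [h2]

-- ===== VERDICT (by name: the statement is the Claim_ definition above) =====
theorem brackets_remove_spec : Claim_equal_brackets_remove := by
  intro code_lines _ _
  unfold Spec_brackets_remove brackets_remove brackets_remove_alt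
  rw [goA_eq_goB]
  rfl
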